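-- pv_equiv track=rewrite | github.com/Sonika-19/PARR-MHQA | scripts/train_learned_hallucination.py | _title_to_contexts
-- ===== SOURCE A (Python) =====
-- from collections import defaultdict
--
-- def _title_to_contexts(chunks):
--     mapping = defaultdict(list)
--     for chunk in chunks:
--         title = str(chunk.get("title", "")).strip()
--         text = str(chunk.get("text", "")).strip()
--         if not title or not text:
--             continue
--         if len(mapping[title]) < 5:
--             mapping[title].append(text)
--     return dict(mapping)
-- ===== SOURCE B (Python) =====
-- def _title_to_contexts(chunks):
--     # Phase 1: collect the valid (stripped title, stripped text) pairs in order.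
--     pairs = []
--     for chunk in chunks:
--         title = str(chunk.get("title", "")).strip()
--         text = str(chunk.get("text", "")).strip()
--         if title and text:
--             pairs.append((title, text))
--     # Phase 2: no incremental grouping dict at all — for each first occurrence of a
--     # title, gather its texts by scanning the pair list, keeping the first five.
--     result = {}
--     for title, _ in pairs:
--         if title not in result:
--             result[title] = [x for t, x in pairs if t == title][:5]
--     return result
-- ===== Notes on version B (the rewrite author's own statement) =====
-- stated objective: alternative
-- what changed: B drops the grouping dict entirely: a first pass collects the valid stripped (title, text) pairs, then for each first occurrence of a title it rescans the pair list to gather that title's first five texts, instead of A's single pass that appends into a defaultdict under an inline len<5 cap.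
import Mathlib
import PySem

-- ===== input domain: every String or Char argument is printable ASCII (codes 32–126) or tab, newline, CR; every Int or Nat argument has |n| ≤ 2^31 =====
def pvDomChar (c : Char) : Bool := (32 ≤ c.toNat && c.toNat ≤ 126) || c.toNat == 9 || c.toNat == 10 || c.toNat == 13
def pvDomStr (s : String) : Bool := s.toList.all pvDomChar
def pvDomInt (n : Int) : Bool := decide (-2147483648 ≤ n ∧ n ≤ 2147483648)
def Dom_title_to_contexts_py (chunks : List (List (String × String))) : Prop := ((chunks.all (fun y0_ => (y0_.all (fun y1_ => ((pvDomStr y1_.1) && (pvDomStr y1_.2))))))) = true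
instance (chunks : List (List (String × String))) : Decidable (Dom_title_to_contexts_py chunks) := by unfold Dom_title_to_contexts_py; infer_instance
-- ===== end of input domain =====

-- B uses no grouping dict: it first collects the valid stripped (title, text) pairs, then for
-- each first occurrence of a title rescans the pair list for that title's first five texts
-- (a genuinely different, rescan-based decomposition; not claimed faster).

-- chunk.get(key, "") on the assoc-list representation of a Python dict: first match, default "".
def pvChunkGet (chunk : List (String × String)) (k : String) : String :=
  ((chunk.find? (fun p => p.1 == k)).map (fun p => p.2)).getD ""

-- ===== PORT A =====
def title_to_contexts_py (chunks : List (List (String × String))) : List (String × List String) :=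
  (chunks.foldl (fun mapping chunk =>
      let title := PySem.Str.strip (pvChunkGet chunk "title")
      let text := PySem.Str.strip (pvChunkGet chunk "text")
      if title = "" || text = "" then mapping
      else
        -- mapping[title] (a defaultdict read); the len<5 cap, then mapping[title].append(text)
        let cur := mapping.getD title []
        if cur.length < 5 then mapping.insert title (cur ++ [text]) else mapping)
    PySem.Dict.empty).items

-- ===== PORT B =====
-- phase 1 of Source B: the pairs.append loop
def pvPairsOf (chunks : List (List (String × String))) : List (String × String) :=
  chunks.foldl (fun pairs chunk =>
      let title := PySem.Str.strip (pvChunkGet chunk "title")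
      let text := PySem.Str.strip (pvChunkGet chunk "text")
      if title = "" || text = "" then pairs else pairs ++ [(title, text)]) []

-- [x for t, x in pairs if t == title][:5]
def pvVal (pairs : List (String × String)) (title : String) : List String :=
  PySem.List.slice ((pairs.filter (fun q => q.1 == title)).map (fun q => q.2)) none (some 5)

def title_to_contexts_py_alt (chunks : List (List (String × String))) : List (String × List String) :=
  let pairs := pvPairsOf chunks
  -- phase 2 of Source B: for each pair's title, if absent, insert the rescanned first-five texts
  (pairs.foldl (fun result p =>
      if result.contains p.1 then result else result.insert p.1 (pvVal pairs p.1))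
    PySem.Dict.empty).items

-- ===== PRECONDITION & SPEC =====
def Spec_title_to_contexts_py (chunks : List (List (String × String))) (out : List (String × List String)) : Prop := out = title_to_contexts_py_alt chunks
instance (chunks : List (List (String × String))) (out : List (String × List String)) : Decidable (Spec_title_to_contexts_py chunks out) := by unfold Spec_title_to_contexts_py; infer_instance

-- ===== CLAIM (what is proved, stated in full; the proofs are below) =====
def Claim_equal_title_to_contexts_py : Prop := ∀ (chunks : List (List (String × String))), Dom_title_to_contexts_py chunks → Spec_title_to_contexts_py chunks (title_to_contexts_py chunks)

-- ===== LEMMAS AND PROOFS =====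

-- 'take 5 of every value' on a dict; A's running state is exactly this image of the uncapped grouping fold's state.
def pvTake5 (d : PySem.Dict String (List String)) : PySem.Dict String (List String) :=
  PySem.Dict.mk (d.items.map (fun p => (p.1, p.2.take 5)))

theorem pvFind?_take5 (l : List (String × List String)) (t : String) :
    (l.map (fun p => (p.1, p.2.take 5))).find? (fun p => p.1 == t)
      = (l.find? (fun p => p.1 == t)).map (fun p => (p.1, p.2.take 5)) := by
  induction l with
  | nil => rfl
  | cons a l ih =>
    by_cases h : a.1 = t <;> simp [beq_iff_eq, h, ih]

theorem pvGetD_take5 (d : PySem.Dict String (List String)) (t : String) :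
    (pvTake5 d).getD t [] = (d.getD t []).take 5 := by
  obtain ⟨l⟩ := d
  simp only [pvTake5, PySem.Dict.getD, PySem.Dict.get?, pvFind?_take5]
  cases l.find? (fun p => p.1 == t) <;> simp

theorem pvContains_take5 (d : PySem.Dict String (List String)) (t : String) :
    (pvTake5 d).contains t = d.contains t := by
  obtain ⟨l⟩ := d
  simp [pvTake5, PySem.Dict.contains, List.any_map, Function.comp_def]

theorem pvInsert_items (d : PySem.Dict String (List String)) (k : String) (v : List String) :
    (d.insert k v).items = if d.contains k then d.items.map (fun p => if p.1 == k then (k, v) else p) else d.items ++ [(k, v)] := by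
  unfold PySem.Dict.insert
  split <;> rfl

theorem pvStep_eq (d : PySem.Dict String (List String)) (hnd : d.keys.Nodup) (t x : String) :
    (if ((pvTake5 d).getD t []).length < 5
       then (pvTake5 d).insert t ((pvTake5 d).getD t [] ++ [x]) else pvTake5 d)
      = pvTake5 (d.insert t (d.getD t [] ++ [x])) := by
  rw [pvGetD_take5]
  cases hg : d.get? t with
  | none =>
    have hc : d.contains t = false := by
      obtain ⟨l⟩ := d
      simp only [PySem.Dict.get?, Option.map_eq_none_iff, List.find?_eq_none] at hg
      simp only [PySem.Dict.contains, List.any_eq_false]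
      exact fun p hp => by simpa using hg p hp
    have hgd : d.getD t [] = [] := PySem.Dict.getD_of_not_contains d [] hc
    have hc' : (pvTake5 d).contains t = false := by rw [pvContains_take5]; exact hc
    apply PySem.Dict.ext
    rw [hgd]
    show ((pvTake5 d).insert t ([].take 5 ++ [x])).items = (pvTake5 (d.insert t ([] ++ [x]))).items
    rw [pvInsert_items, hc']
    conv_rhs => rw [pvTake5]
    rw [pvInsert_items, hc]
    simp [pvTake5]
  | some v =>
    have hgd : d.getD t [] = v := by simp [PySem.Dict.getD, hg]
    have hc : d.contains t = true := by
      obtain ⟨l⟩ := d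
      simp only [PySem.Dict.get?] at hg
      rcases Option.map_eq_some_iff.mp hg with ⟨p, hp, -⟩
      simp only [PySem.Dict.contains, List.any_eq_true]
      refine ⟨p, List.mem_of_find?_eq_some hp, ?_⟩
      have hps := List.find?_some hp
      exact hps
    have hc' : (pvTake5 d).contains t = true := by rw [pvContains_take5]; exact hc
    rw [hgd]
    by_cases h5 : v.length < 5
    · have htv : v.take 5 = v := List.take_of_length_le (by omega)
      rw [htv, if_pos h5]
      have hlen : (v ++ [x]).length ≤ 5 := by
        rw [List.length_append]; simp; omega
      apply PySem.Dict.ext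
      rw [pvInsert_items, hc']
      conv_rhs => rw [pvTake5]
      rw [pvInsert_items, hc]
      simp only [if_pos, pvTake5, List.map_map]
      refine List.map_congr_left fun p hp => ?_
      by_cases ht : p.1 = t
      · simp [ht, List.take_of_length_le hlen]
      · simp [ht]
    · have h5' : ¬ (v.take 5).length < 5 := by rw [List.length_take]; omega
      rw [if_neg h5']
      have hkey : ∀ p ∈ d.items, p.1 = t → p.2 = v := by
        intro p hp hpt
        have h2 := PySem.Dict.get?_of_mem_items d (k := p.1) (v := p.2) (by simpa using hp) hnd
        rw [hpt, hg] at h2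
        exact (Option.some.inj h2).symm
      apply PySem.Dict.ext
      conv_rhs => rw [pvTake5]
      rw [pvInsert_items, hc]
      simp only [if_pos, pvTake5, List.map_map]
      refine (List.map_congr_left fun p hp => ?_).symm
      by_cases ht : p.1 = t
      · have hpv : p.2 = v := hkey p hp ht
        have h5n : 5 ≤ v.length := by omega
        simp [ht, hpv, List.take_append_of_le_length h5n]
      · simp [ht]

theorem pvBridge (chunks : List (List (String × String))) :
    ∀ (d : PySem.Dict String (List String)), d.keys.Nodup →
    chunks.foldl (fun mapping chunk =>
      let title := PySem.Str.strip (pvChunkGet chunk "title")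
      let text := PySem.Str.strip (pvChunkGet chunk "text")
      if title = "" || text = "" then mapping
      else
        let cur := mapping.getD title []
        if cur.length < 5 then mapping.insert title (cur ++ [text]) else mapping) (pvTake5 d)
    = pvTake5 (chunks.foldl (fun mapping chunk =>
      let title := PySem.Str.strip (pvChunkGet chunk "title")
      let text := PySem.Str.strip (pvChunkGet chunk "text")
      if title = "" || text = "" then mapping
      else mapping.modify title [] (fun l => l ++ [text])) d) := by
  induction chunks with
  | nil => intro d _; rfl
  | cons c rest ih =>
    intro d hnd
    simp only [List.foldl_cons]
    by_cases hT : PySem.Str.strip (pvChunkGet c "title") = ""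
    · simp only [hT, decide_true, Bool.true_or, if_pos]
      exact ih d hnd
    · by_cases hX : PySem.Str.strip (pvChunkGet c "text") = ""
      · simp only [hT, hX, decide_true, decide_false, Bool.or_true, if_pos]
        exact ih d hnd
      · simp only [hT, hX, decide_false, Bool.or_self, Bool.false_eq_true, if_false]
        rw [show (PySem.Dict.modify d (PySem.Str.strip (pvChunkGet c "title")) []
              (fun l => l ++ [PySem.Str.strip (pvChunkGet c "text")]))
            = d.insert (PySem.Str.strip (pvChunkGet c "title"))
                (d.getD (PySem.Str.strip (pvChunkGet c "title")) []
                  ++ [PySem.Str.strip (pvChunkGet c "text")]) from by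
          simp [PySem.Dict.modify]]
        rw [pvStep_eq d hnd]
        exact ih _ (PySem.Dict.nodup_keys_insert _ _ _ hnd)

-- phase 1 of Source B collects exactly the good chunks' stripped pairs
def pvGoodB (c : List (String × String)) : Bool :=
  !(decide (PySem.Str.strip (pvChunkGet c "title") = "") || decide (PySem.Str.strip (pvChunkGet c "text") = ""))

def pvPairOf (c : List (String × String)) : String × String :=
  (PySem.Str.strip (pvChunkGet c "title"), PySem.Str.strip (pvChunkGet c "text"))

theorem pvPairsOf_eq_aux (chunks : List (List (String × String))) :
    ∀ acc : List (String × String),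
    chunks.foldl (fun pairs chunk =>
      let title := PySem.Str.strip (pvChunkGet chunk "title")
      let text := PySem.Str.strip (pvChunkGet chunk "text")
      if title = "" || text = "" then pairs else pairs ++ [(title, text)]) acc
    = acc ++ (chunks.filter pvGoodB).map pvPairOf := by
  induction chunks with
  | nil => intro acc; simp
  | cons c rest ih =>
    intro acc
    simp only [List.foldl_cons, List.filter_cons]
    by_cases h : (decide (PySem.Str.strip (pvChunkGet c "title") = "")
        || decide (PySem.Str.strip (pvChunkGet c "text") = "")) = true
    · have hg : pvGoodB c = false := by simp [pvGoodB, h]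
      simp only [h, if_pos, hg]
      exact ih acc
    · have hg : pvGoodB c = true := by simp [pvGoodB]; simpa using h
      rw [if_neg h, ih, if_pos hg]
      simp [pvPairOf]

theorem pvPairsOf_eq (chunks : List (List (String × String))) :
    pvPairsOf chunks = (chunks.filter pvGoodB).map pvPairOf := by
  unfold pvPairsOf
  simpa using pvPairsOf_eq_aux chunks []

-- the uncapped grouping fold over chunks is the modify-append fold over phase 1's pairs
theorem pvUncapped_eq (chunks : List (List (String × String))) :
    ∀ d : PySem.Dict String (List String),
    chunks.foldl (fun mapping chunk =>
      let title := PySem.Str.strip (pvChunkGet chunk "title")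
      let text := PySem.Str.strip (pvChunkGet chunk "text")
      if title = "" || text = "" then mapping
      else mapping.modify title [] (fun l => l ++ [text])) d
    = ((chunks.filter pvGoodB).map pvPairOf).foldl
        (fun d q => d.modify q.1 [] (fun l => l ++ [q.2])) d := by
  induction chunks with
  | nil => intro d; rfl
  | cons c rest ih =>
    intro d
    simp only [List.foldl_cons, List.filter_cons]
    by_cases h : (decide (PySem.Str.strip (pvChunkGet c "title") = "")
        || decide (PySem.Str.strip (pvChunkGet c "text") = "")) = true
    · have hg : pvGoodB c = false := by simp [pvGoodB, h]
      simp only [h, if_pos, hg]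
      exact ih d
    · have hg : pvGoodB c = true := by simp [pvGoodB]; simpa using h
      rw [if_neg h, if_pos hg, List.map_cons, List.foldl_cons]
      exact ih _

-- keys of B's conditional-insert fold: first occurrences, in order
theorem pvCondFold_keys (val : String → List String) (ps : List (String × String)) :
    ∀ d : PySem.Dict String (List String),
    (ps.foldl (fun r q => if r.contains q.1 then r else r.insert q.1 (val q.1)) d).keys
      = PySem.Set.update d.keys (ps.map Prod.fst) := by
  induction ps with
  | nil => intro d; simp [PySem.Set.update]
  | cons q ps ih =>
    intro d
    simp only [List.foldl_cons, List.map_cons, PySem.Set.update_cons]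
    by_cases h : d.contains q.1 = true
    · have hmem : q.1 ∈ d.keys := (PySem.Dict.contains_iff_mem_keys d q.1).mp h
      have ha : PySem.Set.add d.keys q.1 = d.keys := by simp [PySem.Set.add]; exact hmem
      rw [if_pos h, ha]
      exact ih d
    · have hne : d.contains q.1 = false := by simpa using h
      have hm : q.1 ∉ d.keys := fun hmem => by
        simp [(PySem.Dict.contains_iff_mem_keys d q.1).mpr hmem] at hne
      have ha : PySem.Set.add d.keys q.1 = d.keys ++ [q.1] := by simp [PySem.Set.add]; exact hm
      rw [if_neg h, ha, ← PySem.Dict.keys_insert_of_not_contains d (val q.1) hne]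
      exact ih _

-- every key present in B's conditional-insert fold carries exactly val of that key
theorem pvCondFold_getD (val : String → List String) (ps : List (String × String)) :
    ∀ d : PySem.Dict String (List String),
    (∀ c, d.contains c = true → d.getD c [] = val c) →
    ∀ c, (ps.foldl (fun r q => if r.contains q.1 then r else r.insert q.1 (val q.1)) d).contains c = true →
      (ps.foldl (fun r q => if r.contains q.1 then r else r.insert q.1 (val q.1)) d).getD c [] = val c := by
  induction ps with
  | nil => intro d hd c; exact hd c
  | cons q ps ih =>
    intro d hd c
    simp only [List.foldl_cons]
    by_cases h : d.contains q.1 = true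
    · rw [if_pos h]
      exact ih d hd c
    · rw [if_neg h]
      refine ih _ ?_ c
      intro cc hcc
      rw [PySem.Dict.contains_insert] at hcc
      by_cases he : cc = q.1
      · subst he
        rw [PySem.Dict.getD_insert_self]
      · rw [PySem.Dict.getD_insert_of_ne d (val q.1) [] he]
        apply hd
        simpa [he] using hcc

-- ===== VERDICT (by name: the statement is the Claim_ definition above) =====
theorem title_to_contexts_py_spec : Claim_equal_title_to_contexts_py := by
  intro chunks _
  unfold Spec_title_to_contexts_py title_to_contexts_py title_to_contexts_py_alt
  have hb := pvBridge chunks PySem.Dict.empty (by simp [PySem.Dict.empty, PySem.Dict.keys])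
  have he : pvTake5 PySem.Dict.empty = PySem.Dict.empty := rfl
  rw [he, pvUncapped_eq] at hb
  rw [hb]
  rw [pvPairsOf_eq]
  set ps := (chunks.filter pvGoodB).map pvPairOf with hps
  set U := ps.foldl (fun d q => d.modify q.1 [] (fun l => l ++ [q.2])) PySem.Dict.empty with hU
  set V := ps.foldl (fun r q => if r.contains q.1 then r else r.insert q.1 (pvVal ps q.1)) PySem.Dict.empty with hV
  have hUnodup : U.keys.Nodup := PySem.Dict.nodup_keys_foldl_modify_key ps Prod.fst []
    (fun d q l => l ++ [q.2]) PySem.Dict.empty (by simp [PySem.Dict.empty, PySem.Dict.keys])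
  have hUkeys : U.keys = PySem.Set.ofList (ps.map Prod.fst) := by
    rw [hU, PySem.Dict.keys_foldl_modify_key]
    simp [PySem.Dict.empty, PySem.Dict.keys, PySem.Set.update_nil_left]
  have hVkeys : V.keys = PySem.Set.ofList (ps.map Prod.fst) := by
    rw [hV, pvCondFold_keys]
    simp [PySem.Dict.empty, PySem.Dict.keys, PySem.Set.update_nil_left]
  have hVnodup : V.keys.Nodup := by rw [hVkeys]; exact PySem.Set.nodup_ofList _
  have hUget : ∀ c, U.getD c [] = (ps.filter (fun q => q.1 == c)).map (fun q => q.2) := by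
    intro c
    rw [hU, PySem.Dict.getD_foldl_modify_append, PySem.Dict.getD_empty]
    simp
  have hVget : ∀ c, V.contains c = true → V.getD c [] = pvVal ps c := by
    rw [hV]
    exact pvCondFold_getD (pvVal ps) ps PySem.Dict.empty (by simp [PySem.Dict.contains_empty])
  show (pvTake5 U).items = V.items
  have hUitems : U.items = U.keys.map (fun k => (k, U.getD k [])) :=
    PySem.Dict.items_eq_map_keys U hUnodup []
  have hVitems : V.items = V.keys.map (fun k => (k, V.getD k [])) :=
    PySem.Dict.items_eq_map_keys V hVnodup []
  have hT : (pvTake5 U).items = U.items.map (fun p => (p.1, p.2.take 5)) := rfl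
  rw [hT, hUitems, hVitems, hVkeys, hUkeys, List.map_map]
  refine List.map_congr_left fun k hk => ?_
  have hkc : V.contains k = true :=
    (PySem.Dict.contains_iff_mem_keys V k).mpr (by rw [hVkeys]; exact hk)
  simp only [Function.comp_def]
  rw [hUget k, hVget k hkc]
  simp only [pvVal]
  rw [PySem.List.slice_to _ (by norm_num)]
  rfl
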